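-- pv_equiv track=rewrite | github.com/rtk-rnjn/Parrot | cogs/reminder/__init__.py | str_to_snowflake
-- ===== SOURCE A (Python) =====
-- def str_to_snowflake(snowflake_str: str) -> int:
--     alphabet = "0123456789ABCDEFGHIJKLMNOPQRSTUVWXYZabcdefghijklmnopqrstuvwxyz"
--     base = len(alphabet)
--
--     snowflake = 0
--     snowflake_str = snowflake_str[::-1]  # Reverse the input string
--
--     for i, char in enumerate(snowflake_str):
--         snowflake += alphabet.index(char) * (base**i)
--
--     return snowflake
-- ===== SOURCE B (Python) =====
-- _ALPHABET = "0123456789ABCDEFGHIJKLMNOPQRSTUVWXYZabcdefghijklmnopqrstuvwxyz"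
-- _IDX = {c: i for i, c in enumerate(_ALPHABET)}
--
--
-- def str_to_snowflake(snowflake_str: str) -> int:
--     # Horner's method: one left-to-right pass, O(1) dict lookup per char.
--     snowflake = 0
--     for char in snowflake_str:
--         snowflake = snowflake * 62 + _IDX[char]
--     return snowflake
-- ===== Notes on version B (the rewrite author's own statement) =====
-- stated objective: faster
-- what changed: Replaces the reversed-string enumerate loop with alphabet.index and base**i per char by a single left-to-right Horner pass (acc = acc*62 + idx) with a precomputed char->index dict.
import Mathlib
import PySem

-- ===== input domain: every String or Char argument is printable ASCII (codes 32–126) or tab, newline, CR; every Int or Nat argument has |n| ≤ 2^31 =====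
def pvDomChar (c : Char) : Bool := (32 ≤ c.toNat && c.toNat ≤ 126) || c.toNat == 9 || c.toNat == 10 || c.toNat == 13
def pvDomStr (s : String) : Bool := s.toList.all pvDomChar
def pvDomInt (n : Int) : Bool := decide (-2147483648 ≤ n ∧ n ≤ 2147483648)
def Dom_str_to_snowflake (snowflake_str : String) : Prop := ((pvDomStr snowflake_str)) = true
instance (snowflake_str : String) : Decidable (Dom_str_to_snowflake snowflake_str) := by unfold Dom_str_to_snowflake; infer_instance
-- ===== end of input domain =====

-- B replaces A's reversed enumerate + alphabet.index + base**i per char by one Horner pass with a precomputed char->index dict (faster).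


-- ===== PORT A =====
def pvAlphabet : List Char := "0123456789ABCDEFGHIJKLMNOPQRSTUVWXYZabcdefghijklmnopqrstuvwxyz".toList

def str_to_snowflake (snowflake_str : String) : Int :=
  let base : Int := (pvAlphabet.length : Int)
  -- snowflake_str[::-1]: always `some` (step -1 ≠ 0), cf. PySem.Str.slice?_none_none_neg_one
  let rev : String := (PySem.Str.slice? snowflake_str none none (-1)).getD ""
  (PySem.List.enumerate rev.toList 0).foldl
    (fun snowflake p =>
      -- alphabet.index(char): raises ValueError when absent (excluded by Pre_); i ≥ 0 so `**i` is `^ i.toNat`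
      snowflake + ((PySem.List.index? pvAlphabet p.2).getD 0 : Int) * base ^ p.1.toNat)
    0

-- ===== PORT B =====
-- _IDX = {c: i for i, c in enumerate(_ALPHABET)}
def pvIdx : PySem.Dict Char Int :=
  (PySem.List.enumerate pvAlphabet 0).foldl (fun d p => d.insert p.2 p.1) PySem.Dict.empty

def str_to_snowflake_alt (snowflake_str : String) : Int :=
  snowflake_str.toList.foldl
    -- _IDX[char]: raises KeyError when absent (excluded by Pre_)
    (fun snowflake c => snowflake * 62 + (pvIdx.get? c).getD 0)
    0

-- ===== PRECONDITION & SPEC =====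
-- Pre_: every character is base-62 alphanumeric; on any other character A raises ValueError.
def Pre_str_to_snowflake (snowflake_str : String) : Prop :=
  (snowflake_str.toList.all fun c => pvAlphabet.contains c) = true
instance (snowflake_str : String) : Decidable (Pre_str_to_snowflake snowflake_str) := by
  unfold Pre_str_to_snowflake; infer_instance

def pvWitness_str_to_snowflake : String := "Abc123"

def Spec_str_to_snowflake (snowflake_str : String) (out : Int) : Prop := out = str_to_snowflake_alt snowflake_str
instance (snowflake_str : String) (out : Int) : Decidable (Spec_str_to_snowflake snowflake_str out) := by unfold Spec_str_to_snowflake; infer_instance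

-- ===== CLAIM (what is proved, stated in full; the proofs are below) =====
def Claim_equal_str_to_snowflake : Prop := ∀ (snowflake_str : String), Dom_str_to_snowflake snowflake_str → Pre_str_to_snowflake snowflake_str → Spec_str_to_snowflake snowflake_str (str_to_snowflake snowflake_str)

-- ===== LEMMAS AND PROOFS =====

/-- Positional value of a digit string (most-significant first). -/
def pvVal : List Char → Int
  | [] => 0
  | c :: t => ((PySem.List.index? pvAlphabet c).getD 0 : Int) * 62 ^ t.length + pvVal t

lemma pvA_eq_val (l : List Char) :
    (PySem.List.enumerate l.reverse 0).foldl
      (fun snowflake p =>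
        snowflake + ((PySem.List.index? pvAlphabet p.2).getD 0 : Int) * (pvAlphabet.length : Int) ^ p.1.toNat)
      0 = pvVal l := by
  induction l with
  | nil => simp [pvVal]
  | cons c t ih =>
    rw [pvVal, ← ih]
    rw [List.reverse_cons, PySem.List.enumerate_append, List.foldl_append]
    simp [PySem.List.enumerate_cons, PySem.List.enumerate_nil]
    have h62 : (pvAlphabet.length : Int) = 62 := by decide
    rw [h62]
    ring

lemma pvHorner (l : List Char) (n : Int) :
    l.foldl (fun snowflake c => snowflake * 62 + ((PySem.List.index? pvAlphabet c).getD 0 : Int)) n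
      = n * 62 ^ l.length + pvVal l := by
  induction l generalizing n with
  | nil => simp [pvVal]
  | cons c t ih =>
    rw [List.foldl_cons, ih, pvVal]
    rw [List.length_cons, pow_succ]
    ring

set_option maxRecDepth 100000 in
lemma pvIdx_agrees_bool :
    pvAlphabet.all (fun c => (pvIdx.get? c).getD 0 == ((PySem.List.index? pvAlphabet c).getD 0 : Int)) = true := by
  rfl

lemma pvIdx_agrees : ∀ c ∈ pvAlphabet,
    (pvIdx.get? c).getD 0 = ((PySem.List.index? pvAlphabet c).getD 0 : Int) := by
  intro c hc
  have h := pvIdx_agrees_bool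
  rw [List.all_eq_true] at h
  exact eq_of_beq (h c hc)

-- ===== VERDICT (by name: the statement is the Claim_ definition above) =====
theorem str_to_snowflake_spec : Claim_equal_str_to_snowflake := by
  intro s _ hpre
  have hmem : ∀ c ∈ s.toList, c ∈ pvAlphabet := by
    intro c hc
    have h := List.all_eq_true.mp hpre c hc
    simpa using h
  unfold Spec_str_to_snowflake
  have hB : str_to_snowflake_alt s
      = s.toList.foldl
          (fun snowflake c => snowflake * 62 + ((PySem.List.index? pvAlphabet c).getD 0 : Int)) 0 := by
    unfold str_to_snowflake_alt
    apply PySem.List.foldl_congr_mem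
    intro acc c hc
    rw [pvIdx_agrees c (hmem c hc)]
  rw [hB, pvHorner]
  unfold str_to_snowflake
  simp only [PySem.Str.slice?_none_none_neg_one, Option.getD_some]
  have hrev : (String.ofList s.toList.reverse).toList = s.toList.reverse := by
    simp
  rw [hrev, pvA_eq_val]
  ring
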